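-- pv_equiv track=rewrite | github.com/nahowo/Algorithm-study | 백준/Silver/1652. 누울 자리를 찾아라/누울 자리를 찾아라.py | check
-- ===== SOURCE A (Python) =====
-- def check(arr):
--     cnt=0
--     for i in range(len(arr[0])):
--         tmp=arr[i].split('X')
--         for j in tmp:
--             if '..' in j:
--                 cnt+=1
--     return cnt
-- ===== SOURCE B (Python) =====
-- def check(arr):
--     cnt = 0
--     for i in range(len(arr[0])):
--         prev = 'X'
--         seen = False
--         for ch in arr[i]:
--             if ch == 'X':
--                 if seen:
--                     cnt += 1
--                 seen = False
--             elif ch == '.' and prev == '.':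
--                 seen = True
--             prev = ch
--         if seen:
--             cnt += 1
--     return cnt
-- ===== Notes on version B (the rewrite author's own statement) =====
-- stated objective: alternative
-- what changed: Per row, A splits the string on 'X' and runs a substring search '..' on every piece; B makes a single left-to-right character scan keeping the previous character and a seen-pair flag per segment, never materialising the split.
import Mathlib
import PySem

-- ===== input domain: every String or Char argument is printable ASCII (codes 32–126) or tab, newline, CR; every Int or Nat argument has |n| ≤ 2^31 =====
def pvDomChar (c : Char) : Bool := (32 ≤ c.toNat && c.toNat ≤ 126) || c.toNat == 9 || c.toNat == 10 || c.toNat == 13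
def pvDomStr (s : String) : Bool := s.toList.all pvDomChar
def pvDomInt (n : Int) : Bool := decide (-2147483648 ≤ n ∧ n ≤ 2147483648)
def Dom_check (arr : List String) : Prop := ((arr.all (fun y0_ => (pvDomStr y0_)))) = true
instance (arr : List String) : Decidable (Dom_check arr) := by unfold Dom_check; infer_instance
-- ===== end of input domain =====

-- B replaces A's split('X')-then-substring-search per row by a single left-to-right
-- character scan keeping (prev char, seen-pair flag); same outer loop shape, objective: alternative.

-- ===== PORT A =====
def check (arr : List String) : Int :=
  (PySem.List.pyRange 0 (PySem.Str.len (PySem.List.pyGetD arr 0 "")) 1).foldl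
    (fun cnt i =>
      let tmp := ((PySem.Str.split? (PySem.List.pyGetD arr i "") "X").getD [])
      tmp.foldl (fun c j => if PySem.Str.isIn ".." j then c + 1 else c) cnt)
    0

-- ===== PORT B =====
-- one step of B's character scan: state = (prev, seen, cnt)
def bstep (s : Char × Bool × Int) (ch : Char) : Char × Bool × Int :=
  if ch = 'X' then (ch, false, if s.2.1 then s.2.2 + 1 else s.2.2)
  else if ch = '.' ∧ s.1 = '.' then (ch, true, s.2.2)
  else (ch, s.2.1, s.2.2)

def check_alt (arr : List String) : Int :=
  (PySem.List.pyRange 0 (PySem.Str.len (PySem.List.pyGetD arr 0 "")) 1).foldl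
    (fun cnt i =>
      let st := (PySem.List.pyGetD arr i "").toList.foldl bstep ('X', false, cnt)
      if st.2.1 then st.2.2 + 1 else st.2.2)
    0

-- ===== PRECONDITION & SPEC =====
-- Pre_ excludes exactly the inputs where Python A raises IndexError: empty arr (arr[0]),
-- or a first row longer than the number of rows (arr[i] for i ≥ len(arr)).
def Pre_check (arr : List String) : Prop :=
  arr ≠ [] ∧ (arr.headD "").toList.length ≤ arr.length
instance (arr : List String) : Decidable (Pre_check arr) := by unfold Pre_check; infer_instance

def pvWitness_check : List String := ["..X..", ".XXa.", "X...X", ". . .", "....."]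

def Spec_check (arr : List String) (out : Int) : Prop := out = check_alt arr
instance (arr : List String) (out : Int) : Decidable (Spec_check arr out) := by unfold Spec_check; infer_instance

-- ===== CLAIM (what is proved, stated in full; the proofs are below) =====
def Claim_equal_check : Prop := ∀ (arr : List String), Dom_check arr → Pre_check arr → Spec_check arr (check arr)

-- ===== LEMMAS AND PROOFS =====

-- simple structural splitter on 'X' (proof-side model of Python's split('X'))
def mySplit : List Char → List (List Char)
  | [] => [[]]
  | c :: t =>
    if c = 'X' then [] :: mySplit t
    else
      match mySplit t with
      | s :: ss => (c :: s) :: ss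
      | [] => [[c]]

-- "the segment, entered with previous character p, contains two consecutive dots"
def hasDDfrom : Char → List Char → Bool
  | _, [] => false
  | p, c :: t => (decide (c = '.') && decide (p = '.')) || hasDDfrom c t

-- proof-side model of B's per-row count
def segCount : List Char → Char → Bool → Int
  | [], _, seen => if seen then 1 else 0
  | c :: t, prev, seen =>
    if c = 'X' then (if seen then 1 else 0) + segCount t 'X' false
    else segCount t c (seen || (decide (c = '.') && decide (prev = '.')))

theorem mySplit_ne_nil (l : List Char) : mySplit l ≠ [] := by
  cases l with
  | nil => simp [mySplit]
  | cons c t =>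
    simp only [mySplit]
    split
    · simp
    · cases h : mySplit t <;> simp

theorem go_eq (l : List Char) : ∀ (fuel : Nat) (cur : List Char) (acc : List (List Char)),
    l.length < fuel →
    PySem.Chars.splitOn.go ['X'] fuel l cur acc =
      acc.reverse ++ (match mySplit l with
        | s :: ss => (cur.reverse ++ s) :: ss
        | [] => []) := by
  induction l with
  | nil =>
    intro fuel cur acc h
    cases fuel with
    | zero => omega
    | succ f => simp [PySem.Chars.splitOn.go, mySplit]
  | cons c t ih =>
    intro fuel cur acc h
    cases fuel with
    | zero => simp at h
    | succ f =>
      by_cases hc : c = 'X'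
      · subst hc
        have hpre : (['X'] : List Char).isPrefixOf ('X' :: t) = true := by
          simp [List.isPrefixOf]
        rw [show PySem.Chars.splitOn.go ['X'] (f+1) ('X' :: t) cur acc
              = PySem.Chars.splitOn.go ['X'] f (List.drop 1 ('X' :: t)) [] (cur.reverse :: acc) by
            simp [PySem.Chars.splitOn.go, hpre]]
        rw [show List.drop 1 ('X' :: t) = t from rfl]
        rw [ih f [] (cur.reverse :: acc) (by simpa using h)]
        simp only [mySplit, if_pos rfl]
        cases hms : mySplit t with
        | nil => exact absurd hms (mySplit_ne_nil t)
        | cons s ss => simp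
      · have hpre : (['X'] : List Char).isPrefixOf (c :: t) = false := by
          simp only [List.isPrefixOf, Bool.and_eq_false_iff]
          left
          simp
          exact fun h => hc h.symm
        rw [show PySem.Chars.splitOn.go ['X'] (f+1) (c :: t) cur acc
              = PySem.Chars.splitOn.go ['X'] f t (c :: cur) acc by
            simp [PySem.Chars.splitOn.go, hpre]]
        rw [ih f (c :: cur) acc (by simpa using h)]
        simp only [mySplit, if_neg hc]
        cases hms : mySplit t with
        | nil => exact absurd hms (mySplit_ne_nil t)
        | cons s ss => simp

theorem splitOn_eq (l : List Char) : PySem.Chars.splitOn l ['X'] = mySplit l := by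
  unfold PySem.Chars.splitOn
  rw [go_eq l (l.length + 1) [] [] (by omega)]
  cases hms : mySplit l with
  | nil => exact absurd hms (mySplit_ne_nil l)
  | cons s ss => simp

-- hasDDfrom in terms of Python's substring test
theorem hasDDfrom_eq (l : List Char) : ∀ (p : Char),
    hasDDfrom p l =
      ((decide (p = '.') && decide (l.head? = some '.')) || PySem.Chars.isIn ['.', '.'] l) := by
  induction l with
  | nil =>
    intro p
    have : PySem.Chars.isIn ['.', '.'] [] = false := by
      rw [PySem.Chars.isIn_eq_false_iff]
      intro h
      have := h.length_le
      simp at this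
    simp [hasDDfrom, this]
  | cons c t ih =>
    intro p
    have hinf : PySem.Chars.isIn ['.', '.'] (c :: t)
        = ((decide (c = '.') && decide (t.head? = some '.')) || PySem.Chars.isIn ['.', '.'] t) := by
      by_cases h : PySem.Chars.isIn ['.', '.'] (c :: t) = true
      · rw [h]
        rcases (PySem.Chars.isIn_iff_infix _ _).mp h with hif
        rcases List.infix_cons_iff.mp hif with hp | hi
        · rcases List.cons_prefix_cons.mp hp with ⟨rfl, hp2⟩
          cases t with
          | nil => exact absurd hp2 (by simp)
          | cons d t' =>
            rcases List.cons_prefix_cons.mp hp2 with ⟨rfl, _⟩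
            simp
        · rw [(PySem.Chars.isIn_iff_infix _ _).mpr hi]
          simp
      · rw [eq_false_of_ne_true h]
        have hni := (PySem.Chars.isIn_eq_false_iff _ _).mp (eq_false_of_ne_true h)
        have h1 : PySem.Chars.isIn ['.', '.'] t = false := by
          rw [PySem.Chars.isIn_eq_false_iff]
          intro hi
          exact hni (List.infix_cons_iff.mpr (Or.inr hi))
        have h2 : ¬(c = '.' ∧ t.head? = some '.') := by
          rintro ⟨rfl, hh⟩
          cases t with
          | nil => simp at hh
          | cons d t' =>
            simp at hh
            subst hh
            exact hni (List.infix_cons_iff.mpr (Or.inl (List.cons_prefix_cons.mpr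
              ⟨rfl, List.cons_prefix_cons.mpr ⟨rfl, List.nil_prefix⟩⟩)))
        by_cases hc : c = '.'
        · by_cases hh : t.head? = some '.'
          · exact absurd ⟨hc, hh⟩ h2
          · simp [h1, hh]
        · simp [h1, hc]
    rw [hinf]
    simp only [hasDDfrom, ih c, List.head?_cons]
    by_cases hp : p = '.' <;> by_cases hc : c = '.' <;> simp [hp, hc]

theorem hasDDfrom_X (l : List Char) : hasDDfrom 'X' l = PySem.Chars.isIn ['.', '.'] l := by
  rw [hasDDfrom_eq]
  simp

-- B's scan+flush equals segCount
theorem bfold_eq (cs : List Char) : ∀ (prev : Char) (seen : Bool) (cnt : Int),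
    (if (cs.foldl bstep (prev, seen, cnt)).2.1
     then (cs.foldl bstep (prev, seen, cnt)).2.2 + 1
     else (cs.foldl bstep (prev, seen, cnt)).2.2) = cnt + segCount cs prev seen := by
  induction cs with
  | nil =>
    intro prev seen cnt
    cases seen <;> simp [segCount] <;> ring
  | cons c t ih =>
    intro prev seen cnt
    by_cases hc : c = 'X'
    · subst hc
      simp only [List.foldl_cons, bstep, if_pos rfl, segCount]
      cases seen <;> simp only [Bool.false_eq_true, if_false, if_true, ih] <;> ring
    · by_cases hd : c = '.' ∧ prev = '.'
      · simp only [List.foldl_cons, bstep, if_neg hc, if_pos hd, segCount, ih,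
          if_neg hc, hd.1, hd.2]
        simp
      · simp only [List.foldl_cons, bstep, if_neg hc, if_neg hd, segCount, ih, if_neg hc]
        congr 2
        by_cases h1 : c = '.' <;> by_cases h2 : prev = '.' <;>
          simp [h1, h2] at hd ⊢ <;> tauto

-- segCount counts the split segments
theorem segCount_eq (cs : List Char) : ∀ (prev : Char) (seen : Bool),
    segCount cs prev seen =
      (match mySplit cs with
       | s :: rest => (if (seen || hasDDfrom prev s) then 1 else 0)
           + (rest.countP (fun s => hasDDfrom 'X' s) : Int)
       | [] => 0) := by
  induction cs with
  | nil =>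
    intro prev seen
    simp [segCount, mySplit, hasDDfrom]
  | cons c t ih =>
    intro prev seen
    by_cases hc : c = 'X'
    · subst hc
      simp only [segCount, if_pos rfl, mySplit]
      rw [ih 'X' false]
      cases hms : mySplit t with
      | nil => exact absurd hms (mySplit_ne_nil t)
      | cons s ss =>
        simp only [Bool.false_or, List.countP_cons]
        cases h : hasDDfrom 'X' s <;> cases seen <;> simp [h, hasDDfrom] <;> push_cast <;> ring
    · simp only [segCount, if_neg hc]
      rw [ih c (seen || (decide (c = '.') && decide (prev = '.')))]
      simp only [mySplit, if_neg hc]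
      cases hms : mySplit t with
      | nil => exact absurd hms (mySplit_ne_nil t)
      | cons s ss =>
        simp only [hasDDfrom]
        congr 1
        congr 1
        cases seen <;> simp [Bool.or_assoc, Bool.or_comm, Bool.or_left_comm]

-- per-row: A's split-and-scan equals B's character scan
theorem row_eq (s : String) (cnt : Int) :
    (((PySem.Str.split? s "X").getD []).foldl
        (fun c j => if PySem.Str.isIn ".." j then c + 1 else c) cnt)
    = (if (s.toList.foldl bstep ('X', false, cnt)).2.1
       then (s.toList.foldl bstep ('X', false, cnt)).2.2 + 1
       else (s.toList.foldl bstep ('X', false, cnt)).2.2) := by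
  have hsplit : PySem.Str.split? s "X"
      = some ((PySem.Chars.splitOn s.toList ['X']).map String.ofList) := by
    simp [PySem.Str.split?, PySem.Chars.split?]
  rw [hsplit]
  simp only [Option.getD_some]
  rw [PySem.List.foldl_if_add_one, List.countP_map]
  rw [bfold_eq, segCount_eq, splitOn_eq]
  cases hms : mySplit s.toList with
  | nil => exact absurd hms (mySplit_ne_nil s.toList)
  | cons sg rest =>
    have hpt : ∀ l : List Char,
        ((fun j => PySem.Str.isIn ".." j) ∘ String.ofList) l = hasDDfrom 'X' l := by
      intro l
      simp [Function.comp, PySem.Str.isIn_eq, hasDDfrom_X]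
    rw [List.countP_congr (fun x _ => by rw [hpt x])]
    simp only [List.countP_cons, Bool.false_or]
    cases h : hasDDfrom 'X' sg <;> simp [h] <;> push_cast <;> ring

-- ===== VERDICT (by name: the statement is the Claim_ definition above) =====
theorem check_spec : Claim_equal_check := by
  intro arr _ _
  unfold Spec_check check check_alt
  congr 1
  funext cnt i
  simpa using row_eq (PySem.List.pyGetD arr i "") cnt
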